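-- pv_equiv track=rewrite | github.com/huynhnhathao/fastnas | Experiments/core/nats_api.py | genome_to_genotypes
-- ===== SOURCE A (Python) =====
-- from typing import List, Tuple, Dict, Optional, Union
--
-- _OPERATIONS = ["none", "skip_connect", "nor_conv_1x1", "nor_conv_3x3", "avg_pool_3x3"]
--
-- def genome_to_genotypes(genome: List[int]) -> List[int]:
--     """
--     decode genome to genotypes
--
--     example genome: [1, 2, 3, 3, 4, 4] -> [(('skip_connect', 0),),
--                                         (('nor_conv_1x1', 0), ('nor_conv_3x3', 1)),
--                                         (('nor_conv_3x3', 0), ('avg_pool_3x3', 1), ('avg_pool_3x3', 2))]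
--
--     """
--     # there are 6 edges in each cell
--     if len(genome) != 6:
--         raise ValueError('Len of genome must be 6 for the NATS bench dataset')
--
--     for gen in genome:
--         if 4 < gen < 0:
--             raise ValueError('there are only 5 operations index in [0, 4]')
--
--     genotypes = [((_OPERATIONS[genome[0]], 0),  ), ( (_OPERATIONS[genome[1]], 0), (_OPERATIONS[genome[2]], 1) ),
--                 ( (_OPERATIONS[genome[3]], 0), (_OPERATIONS[genome[4]], 1), (_OPERATIONS[genome[5]], 2))]
--     return genotypes
-- ===== SOURCE B (Python) =====
-- _OPERATIONS = ["none", "skip_connect", "nor_conv_1x1", "nor_conv_3x3", "avg_pool_3x3"]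
--
-- def genome_to_genotypes(genome):
--     if len(genome) != 6:
--         raise ValueError('Len of genome must be 6 for the NATS bench dataset')
--
--     def build(rest, node):
--         # peel off the 'node' leading genes: they are the edges of the current node
--         if not rest:
--             return []
--         head, tail = rest[:node], rest[node:]
--         return [tuple((_OPERATIONS[g], j) for j, g in enumerate(head))] + build(tail, node + 1)
--
--     return build(list(genome), 1)
-- ===== Notes on version B (the rewrite author's own statement) =====
-- stated objective: alternative
-- what changed: Replaces A's three hand-written genotype tuple literals with a recursive chunk-peeling: the genome is split into slices of growing length 1,2,3, each slice enumerated into an edge tuple; A's dead '4 < gen < 0' check is dropped as unsatisfiable.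
import Mathlib
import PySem

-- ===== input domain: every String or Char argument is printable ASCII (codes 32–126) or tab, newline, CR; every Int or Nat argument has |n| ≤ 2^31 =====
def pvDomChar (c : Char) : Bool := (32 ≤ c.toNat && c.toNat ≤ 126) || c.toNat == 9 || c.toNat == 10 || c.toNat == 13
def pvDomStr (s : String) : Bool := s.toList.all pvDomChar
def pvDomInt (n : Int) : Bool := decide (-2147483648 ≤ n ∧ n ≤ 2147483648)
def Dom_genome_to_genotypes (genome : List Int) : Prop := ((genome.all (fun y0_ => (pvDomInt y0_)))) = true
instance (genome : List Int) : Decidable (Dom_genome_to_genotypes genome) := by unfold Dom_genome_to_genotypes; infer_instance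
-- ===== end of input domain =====

-- B builds the genotypes by recursively peeling slices of growing length (1, 2, 3) off the
-- genome and enumerating each slice into an edge tuple, instead of A's three hand-written
-- tuple literals; A's dead '4 < gen < 0' check is dropped. Return values agree on all of Pre_.

-- ===== PORT A =====
def pvOps : List String := ["none", "skip_connect", "nor_conv_1x1", "nor_conv_3x3", "avg_pool_3x3"]

-- literal port of A: length guard (raise outside Pre_), dead validation loop, three tuple literals
def genome_to_genotypes (genome : List Int) : List (List (String × Int)) :=
  if genome.length ≠ 6 then []  -- ValueError: excluded by Pre_
  else if genome.any (fun gen => decide (4 < gen) && decide (gen < 0)) then []  -- A's dead check (never fires)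
  else
    [[(PySem.List.pyGetD pvOps (PySem.List.pyGetD genome 0 0) "", 0)],
     [(PySem.List.pyGetD pvOps (PySem.List.pyGetD genome 1 0) "", 0),
      (PySem.List.pyGetD pvOps (PySem.List.pyGetD genome 2 0) "", 1)],
     [(PySem.List.pyGetD pvOps (PySem.List.pyGetD genome 3 0) "", 0),
      (PySem.List.pyGetD pvOps (PySem.List.pyGetD genome 4 0) "", 1),
      (PySem.List.pyGetD pvOps (PySem.List.pyGetD genome 5 0) "", 2)]]

-- ===== PORT B =====
-- build(rest, node): B always calls it with node ≥ 1, so node is represented as nprev+1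
-- (nprev : Nat); rest[:node]/rest[node:] with node ≥ 0 are exactly take/drop.
def pvBuild (rest : List Int) (nprev : Nat) : List (List (String × Int)) :=
  match rest with
  | [] => []
  | g :: t =>
    let head := (g :: t).take (nprev + 1)
    let tail := (g :: t).drop (nprev + 1)
    (head.zipIdx.map (fun gj => (PySem.List.pyGetD pvOps gj.1 "", (gj.2 : Int)))) ::
      pvBuild tail (nprev + 1)
termination_by rest.length
decreasing_by simp [List.length_drop]

def genome_to_genotypes_alt (genome : List Int) : List (List (String × Int)) :=
  if genome.length ≠ 6 then []  -- ValueError: excluded by Pre_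
  else pvBuild genome 0

-- ===== PRECONDITION & SPEC =====
-- Pre_: exactly the inputs on which A returns: length 6 (else ValueError) and every entry a
-- valid Python index into the 5-element operation list, i.e. -5 ≤ g ≤ 4 (else IndexError).
def Pre_genome_to_genotypes (genome : List Int) : Prop :=
  genome.length = 6 ∧ ∀ g ∈ genome, -5 ≤ g ∧ g ≤ 4
instance (genome : List Int) : Decidable (Pre_genome_to_genotypes genome) := by
  unfold Pre_genome_to_genotypes; infer_instance

def pvWitness_genome_to_genotypes : List Int := [1, 2, 3, 3, 4, 4]

def Spec_genome_to_genotypes (genome : List Int) (out : List (List (String × Int))) : Prop := out = genome_to_genotypes_alt genome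
instance (genome : List Int) (out : List (List (String × Int))) : Decidable (Spec_genome_to_genotypes genome out) := by unfold Spec_genome_to_genotypes; infer_instance

-- ===== CLAIM (what is proved, stated in full; the proofs are below) =====
def Claim_equal_genome_to_genotypes : Prop := ∀ (genome : List Int), Dom_genome_to_genotypes genome → Pre_genome_to_genotypes genome → Spec_genome_to_genotypes genome (genome_to_genotypes genome)

-- ===== LEMMAS AND PROOFS =====

-- ===== VERDICT (by name: the statement is the Claim_ definition above) =====
theorem genome_to_genotypes_spec : Claim_equal_genome_to_genotypes := by
  intro genome _ hpre
  obtain ⟨hlen, _⟩ := hpre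
  unfold Spec_genome_to_genotypes
  match genome, hlen with
  | [a, b, c, d, e, f], _ =>
    have hdead : ([a, b, c, d, e, f].any (fun gen => decide (4 < gen) && decide (gen < 0))) = false := by
      simp only [List.any_eq_false]
      intro g _
      by_cases h4 : 4 < g
      · simp [h4]; omega
      · simp [h4]
    simp only [genome_to_genotypes, genome_to_genotypes_alt, hdead, Bool.false_eq_true, if_false]
    norm_num
    simp only [pvBuild, List.take, List.drop, List.zipIdx, List.map]
    rfl
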